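-- pv_equiv track=rewrite | github.com/scchow/aoc-2021 | day2/python/day2_p1.py | execute_commands
-- ===== SOURCE A (Python) =====
-- def execute_commands(commands: list):
--     """ Execute a list of command tuples (direction, units)
--     on a vehicle
--
--     Args:
--         l (list): List of command tuples
--
--     Returns:
--         List [horizontal, vertical]: final horizontal and vertical position of vehicle
--     """
--
--     # vehicle state represented as a list: [horizontal position, vertical position]
--     state = [0, 0]
--
--     for direction, units in commands:
--         if direction == "forward":
--             state[0] += units
--         if direction == "up":
--             state[1] -= units
--         if direction == "down":
--             state[1] += units
--
--     return state
-- ===== SOURCE B (Python) =====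
-- def execute_commands(commands: list):
--     """Three independent aggregating passes instead of one accumulating loop."""
--     horizontal = sum(u for d, u in commands if d == "forward")
--     down = sum(u for d, u in commands if d == "down")
--     up = sum(u for d, u in commands if d == "up")
--     return [horizontal, down - up]
-- ===== Notes on version B (the rewrite author's own statement) =====
-- stated objective: alternative
-- what changed: Replaces the single loop maintaining a mutable [h,v] state with three independent filtered-sum passes (forward, down, up) combined as [horizontal, down - up].
import Mathlib
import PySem

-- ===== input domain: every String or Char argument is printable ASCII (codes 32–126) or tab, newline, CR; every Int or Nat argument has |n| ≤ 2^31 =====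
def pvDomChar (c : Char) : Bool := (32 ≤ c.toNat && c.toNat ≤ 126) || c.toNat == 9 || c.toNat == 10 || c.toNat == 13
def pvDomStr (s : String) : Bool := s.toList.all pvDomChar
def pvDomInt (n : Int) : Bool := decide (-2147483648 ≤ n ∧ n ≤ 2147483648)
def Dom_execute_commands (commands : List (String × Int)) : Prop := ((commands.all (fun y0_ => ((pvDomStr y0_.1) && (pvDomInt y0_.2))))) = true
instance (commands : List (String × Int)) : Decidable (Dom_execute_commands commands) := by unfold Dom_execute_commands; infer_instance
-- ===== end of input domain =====

-- B computes the final position as three independent filtered sums instead of one accumulating loop; objective: alternative decomposition.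


-- ===== PORT A =====
def execute_commands (commands : List (String × Int)) : List Int :=
  let state := commands.foldl (fun (state : Int × Int) (c : String × Int) =>
    let state := if c.1 == "forward" then (state.1 + c.2, state.2) else state
    let state := if c.1 == "up" then (state.1, state.2 - c.2) else state
    let state := if c.1 == "down" then (state.1, state.2 + c.2) else state
    state) (0, 0)
  [state.1, state.2]

-- ===== PORT B =====
def execute_commands_alt (commands : List (String × Int)) : List Int :=
  let horizontal := ((commands.filter (fun c => c.1 == "forward")).map Prod.snd).sum
  let down := ((commands.filter (fun c => c.1 == "down")).map Prod.snd).sum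
  let up := ((commands.filter (fun c => c.1 == "up")).map Prod.snd).sum
  [horizontal, down - up]

-- ===== PRECONDITION & SPEC =====
def Spec_execute_commands (commands : List (String × Int)) (out : List Int) : Prop := out = execute_commands_alt commands
instance (commands : List (String × Int)) (out : List Int) : Decidable (Spec_execute_commands commands out) := by unfold Spec_execute_commands; infer_instance

-- ===== CLAIM (what is proved, stated in full; the proofs are below) =====
def Claim_equal_execute_commands : Prop := ∀ (commands : List (String × Int)), Dom_execute_commands commands → Spec_execute_commands commands (execute_commands commands)

-- ===== LEMMAS AND PROOFS =====
theorem execute_commands_foldl_inv (l : List (String × Int)) (h v : Int) :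
    l.foldl (fun (state : Int × Int) (c : String × Int) =>
      let state := if c.1 == "forward" then (state.1 + c.2, state.2) else state
      let state := if c.1 == "up" then (state.1, state.2 - c.2) else state
      let state := if c.1 == "down" then (state.1, state.2 + c.2) else state
      state) (h, v)
    = (h + ((l.filter (fun c => c.1 == "forward")).map Prod.snd).sum,
       v + ((l.filter (fun c => c.1 == "down")).map Prod.snd).sum
         - ((l.filter (fun c => c.1 == "up")).map Prod.snd).sum) := by
  induction l generalizing h v with
  | nil => simp
  | cons hd tl ih =>
    simp only [List.foldl_cons, List.filter_cons]
    by_cases hf : hd.1 == "forward" <;> by_cases hu : hd.1 == "up" <;>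
      by_cases hd' : hd.1 == "down" <;>
      simp_all [ih] <;> ring

-- ===== VERDICT (by name: the statement is the Claim_ definition above) =====
theorem execute_commands_spec : Claim_equal_execute_commands := by
  intro commands _
  unfold Spec_execute_commands execute_commands execute_commands_alt
  simp only [execute_commands_foldl_inv]
  simp
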